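-- pv_equiv track=rewrite | github.com/bi-seek/ejemplo_python | Practica 2/ejercicio12.py | actualizar_linea
-- ===== SOURCE A (Python) =====
-- def actualizar_linea (linea, j, nuevo_valor):
--     #aux es un string con la info actualizada
--     aux = ''
--
--     for i in range(len(linea)):
--         #j es la posicion donde debo insertar el nuevo valor
--         if i == j:
--             aux = aux + nuevo_valor
--         else:
--             aux = aux + linea[i]
--
--     return aux
-- ===== SOURCE B (Python) =====
-- def actualizar_linea(linea, j, nuevo_valor):
--     if 0 <= j < len(linea):
--         return linea[:j] + nuevo_valor + linea[j+1:]
--     return linea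
-- ===== Notes on version B (the rewrite author's own statement) =====
-- stated objective: faster
-- what changed: Replaces the per-character accumulating loop with a range check and three slice operations (prefix + new value + suffix), no loop.
import Mathlib
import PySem

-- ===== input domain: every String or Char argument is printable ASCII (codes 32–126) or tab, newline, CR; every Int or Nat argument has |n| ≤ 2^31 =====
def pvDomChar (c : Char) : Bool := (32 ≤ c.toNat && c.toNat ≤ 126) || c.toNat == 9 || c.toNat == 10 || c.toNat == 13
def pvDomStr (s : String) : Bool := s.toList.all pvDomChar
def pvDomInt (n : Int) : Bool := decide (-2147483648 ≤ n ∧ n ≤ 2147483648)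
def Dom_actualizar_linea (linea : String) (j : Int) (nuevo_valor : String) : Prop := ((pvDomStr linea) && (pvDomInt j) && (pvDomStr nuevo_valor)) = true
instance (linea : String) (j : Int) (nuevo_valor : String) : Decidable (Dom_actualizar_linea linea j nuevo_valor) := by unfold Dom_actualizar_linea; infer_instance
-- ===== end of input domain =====

-- B replaces A's per-character accumulating loop with a range check and three slices.

-- ===== PORT A =====
-- A: aux = ''; for i in range(len(linea)): aux += nuevo_valor if i == j else linea[i]
def actualizar_linea (linea : String) (j : Int) (nuevo_valor : String) : String :=
  String.ofList ((PySem.List.enumerate linea.toList 0).foldl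
    (fun aux p => if p.1 = j then aux ++ nuevo_valor.toList else aux ++ [p.2]) [])

-- ===== PORT B =====
-- B: if 0 <= j < len(linea): linea[:j] + nuevo_valor + linea[j+1:] else linea
def actualizar_linea_alt (linea : String) (j : Int) (nuevo_valor : String) : String :=
  if 0 ≤ j ∧ j < (linea.toList.length : Int) then
    String.ofList (PySem.List.slice linea.toList none (some j) ++ nuevo_valor.toList ++
               PySem.List.slice linea.toList (some (j + 1)) none)
  else linea

-- ===== PRECONDITION & SPEC =====
def Spec_actualizar_linea (linea : String) (j : Int) (nuevo_valor : String) (out : String) : Prop := out = actualizar_linea_alt linea j nuevo_valor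
instance (linea : String) (j : Int) (nuevo_valor : String) (out : String) : Decidable (Spec_actualizar_linea linea j nuevo_valor out) := by unfold Spec_actualizar_linea; infer_instance

-- ===== CLAIM (what is proved, stated in full; the proofs are below) =====
def Claim_equal_actualizar_linea : Prop := ∀ (linea : String) (j : Int) (nuevo_valor : String), Dom_actualizar_linea linea j nuevo_valor → Spec_actualizar_linea linea j nuevo_valor (actualizar_linea linea j nuevo_valor)

-- ===== LEMMAS AND PROOFS =====

-- A's loop, rewritten as a flatMap over the enumerated characters, equals the slice form.
theorem pv_flat_enum (l : List Char) (nv : List Char) (j s : Int) :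
    (PySem.List.enumerate l s).flatMap (fun p => if p.1 = j then nv else [p.2]) =
    if s ≤ j ∧ j < s + l.length then
      l.take (j - s).toNat ++ nv ++ l.drop ((j - s).toNat + 1)
    else l := by
  induction l generalizing s with
  | nil => simp [PySem.List.enumerate_nil]
  | cons c t ih =>
    rw [PySem.List.enumerate_cons, List.flatMap_cons, ih (s + 1)]
    by_cases hj : s = j
    · subst hj
      have h1 : ¬ (s + 1 ≤ s ∧ s < s + 1 + t.length) := by omega
      simp
    · simp only [if_neg hj]
      by_cases h2 : s + 1 ≤ j ∧ j < s + 1 + (t.length : Int)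
      · have h3 : s ≤ j ∧ j < s + ((c :: t).length : Int) := by
          simp at h2 ⊢; omega
        rw [if_pos h2, if_pos h3]
        have hk : (j - s).toNat = (j - (s + 1)).toNat + 1 := by omega
        simp [hk, List.take_succ_cons, List.drop_succ_cons]
      · have h3 : ¬ (s ≤ j ∧ j < s + ((c :: t).length : Int)) := by
          simp at h2 ⊢; omega
        rw [if_neg h2, if_neg h3]
        simp

-- ===== VERDICT (by name: the statement is the Claim_ definition above) =====
theorem actualizar_linea_spec : Claim_equal_actualizar_linea := by
  intro linea j nv _
  unfold Spec_actualizar_linea actualizar_linea actualizar_linea_alt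
  have hf : (fun (aux : List Char) (p : Int × Char) =>
      if p.1 = j then aux ++ nv.toList else aux ++ [p.2]) =
      (fun aux p => aux ++ (if p.1 = j then nv.toList else [p.2])) := by
    funext aux p; split <;> rfl
  rw [hf, PySem.List.foldl_append_eq_flatMap, List.nil_append,
      pv_flat_enum linea.toList nv.toList j 0]
  by_cases h : 0 ≤ j ∧ j < (linea.toList.length : Int)
  · have h' : (0 : Int) ≤ j ∧ j < 0 + (linea.toList.length : Int) := by omega
    rw [if_pos h', if_pos h]
    rw [PySem.List.slice_to _ h.1, PySem.List.slice_from _ (by omega : (0:Int) ≤ j + 1)]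
    have e1 : (j - 0).toNat = j.toNat := by omega
    have e2 : (j + 1).toNat = j.toNat + 1 := by omega
    rw [e1, e2]
  · have h' : ¬ ((0 : Int) ≤ j ∧ j < 0 + (linea.toList.length : Int)) := by omega
    rw [if_neg h', if_neg h]
    simp
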